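-- pv_equiv track=rewrite | github.com/rohanraaj2/Programming-Fundamentals | Lab 11/7.py | major
-- ===== SOURCE A (Python) =====
-- def major(m):
--     #print (m)
--     a = []
--     b = []
--     c = []
--     for p in range(len (m)):
--         if m[p][1] not in a:
--             a.append(m[p][1])
--     a.sort()
--     #print (a)
--     for x in range (len(a)):
--         for p in range(len (m)):
--                 if m[p][1] == a[x]:
--                     b.append(m[p])
--         #print (b)
--         r = name(b)
--         c.append(r)
--         b = []
--     #print (c)
--     return (c)
--
-- def name (n):
--     d = []
--     h = []
--     for e in range(len(n)):
--         if n[e][0] not in d: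
--             d.append(n[e][0])
--     d.sort()
--     #print (d)
--     for f in range (len(d)):
--         for g in range(len (n)):
--                 if n[g][0] == d[f]:
--                     h.append(n[g])
--     #print (h)
--     return (h)
-- ===== SOURCE B (Python) =====
-- def major(m):
--     groups = {}
--     for row in m:
--         groups.setdefault(row[1], []).append(row)
--     return [sorted(groups[k], key=lambda r: r[0]) for k in sorted(groups)]
-- ===== Notes on version B (the rewrite author's own statement) =====
-- stated objective: simpler
-- what changed: Replaces A's repeated full scans (one pass over the whole list per distinct major, and again per distinct name inside each group) by a single-pass dict grouping on major followed by one stable sort per bucket keyed on the name field.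
import Mathlib
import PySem

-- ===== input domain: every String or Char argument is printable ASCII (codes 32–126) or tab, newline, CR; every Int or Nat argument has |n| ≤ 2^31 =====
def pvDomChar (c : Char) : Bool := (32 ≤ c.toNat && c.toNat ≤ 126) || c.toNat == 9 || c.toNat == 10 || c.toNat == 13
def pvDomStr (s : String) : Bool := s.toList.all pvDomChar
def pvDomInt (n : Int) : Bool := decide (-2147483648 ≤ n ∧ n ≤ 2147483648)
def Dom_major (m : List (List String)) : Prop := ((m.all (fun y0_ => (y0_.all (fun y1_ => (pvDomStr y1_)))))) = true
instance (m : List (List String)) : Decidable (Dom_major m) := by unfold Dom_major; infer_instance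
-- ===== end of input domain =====

-- B replaces A's repeated full scans per distinct major/name by one-pass dict grouping plus one stable sort per bucket (simpler).



-- ===== PORT A =====
def nameA (n : List (List String)) : List (List String) :=
  let d := n.foldl (fun d row =>
    if PySem.List.pyGetD row 0 "" ∈ d then d else d ++ [PySem.List.pyGetD row 0 ""]) []
  let d2 := PySem.List.sorted d (fun x => x) false
  d2.foldl (fun h f =>
    n.foldl (fun h row => if PySem.List.pyGetD row 0 "" = f then h ++ [row] else h) h) []

def major (m : List (List String)) : List (List (List String)) :=
  let a := m.foldl (fun a row =>
    if PySem.List.pyGetD row 1 "" ∈ a then a else a ++ [PySem.List.pyGetD row 1 ""]) []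
  let a2 := PySem.List.sorted a (fun x => x) false
  a2.foldl (fun c x =>
    let b := m.foldl (fun b row => if PySem.List.pyGetD row 1 "" = x then b ++ [row] else b) []
    c ++ [nameA b]) []

-- ===== PORT B =====
def major_alt (m : List (List String)) : List (List (List String)) :=
  let groups := m.foldl
    (fun d row => d.modify (PySem.List.pyGetD row 1 "") [] (fun v => v ++ [row]))
    (PySem.Dict.empty : PySem.Dict String (List (List String)))
  (PySem.List.sorted (PySem.Dict.keys groups) (fun k => k) false).map
    (fun k => PySem.List.sorted (PySem.Dict.getD groups k []) (fun r => PySem.List.pyGetD r 0 "") false)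

-- ===== PRECONDITION & SPEC =====
-- Pre_ excludes exactly the inputs on which Python A raises IndexError: a row with fewer than two fields.
def Pre_major (m : List (List String)) : Prop := ∀ row ∈ m, 2 ≤ row.length
instance (m : List (List String)) : Decidable (Pre_major m) := by unfold Pre_major; infer_instance
def pvWitness_major : List (List String) := [["bob", "cs"], ["amy", "math"], ["al", "cs"]]
def Spec_major (m : List (List String)) (out : List (List (List String))) : Prop := out = major_alt m
instance (m : List (List String)) (out : List (List (List String))) : Decidable (Spec_major m out) := by unfold Spec_major; infer_instance

-- ===== CLAIM (what is proved, stated in full; the proofs are below) =====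
def Claim_equal_major : Prop := ∀ (m : List (List String)), Dom_major m → Pre_major m → Spec_major m (major m)

-- ===== LEMMAS AND PROOFS =====


theorem insertBy_split {α : Type} (bf : α → α → Bool) (x : α) (l1 l2 : List α)
    (h1 : ∀ y ∈ l1, bf x y = false) (h2 : ∀ z ∈ l2, bf x z = true) :
    PySem.List.insertBy bf x (l1 ++ l2) = l1 ++ x :: l2 := by
  induction l1 with
  | nil =>
      cases l2 with
      | nil => rfl
      | cons z t => simp [PySem.List.insertBy, h2 z (by simp)]
  | cons y ys ih =>
      have hy := h1 y (by simp)
      simp only [List.cons_append, PySem.List.insertBy, hy, Bool.false_eq_true, if_false]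
      exact congrArg (y :: ·) (ih (fun v hv => h1 v (by simp [hv])))

theorem stable_sort_flatMap {α : Type} (key : α → String) (xs : List α) :
    (PySem.List.sorted (PySem.Set.ofList (xs.map key)) (fun k => k) false).flatMap
      (fun k => xs.filter (fun y => key y == k))
    = PySem.List.sorted xs key false := by
  induction xs using List.reverseRecOn with
  | nil => rfl
  | append_singleton xs x ih =>
    have hsorted_app : PySem.List.sorted (xs ++ [x]) key false
        = PySem.List.insertBy (fun a b => decide (key a < key b)) x (PySem.List.sorted xs key false) := by
      rw [PySem.List.sorted_eq_foldl_insertBy (xs ++ [x]) key, List.foldl_append,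
          ← PySem.List.sorted_eq_foldl_insertBy xs key]
      rfl
    have hofl : PySem.Set.ofList ((xs ++ [x]).map key)
        = PySem.Set.add (PySem.Set.ofList (xs.map key)) (key x) := by
      rw [List.map_append, PySem.Set.ofList_eq_foldl, List.foldl_append,
          ← PySem.Set.ofList_eq_foldl]
      rfl
    set f : String → List α := fun k => xs.filter (fun y => key y == k) with hf
    set f' : String → List α := fun k => (xs ++ [x]).filter (fun y => key y == k) with hf'
    set K := PySem.List.sorted (PySem.Set.ofList (xs.map key)) (fun k => k) false with hK
    have hKp : K.Pairwise (· < ·) := PySem.List.sorted_ofList_pairwise_lt (xs.map key)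
    have hKmem : ∀ k, k ∈ K ↔ k ∈ xs.map key := fun k =>
      (PySem.List.mem_sorted _ _ _ k).trans (PySem.Set.mem_ofList _ k)
    set A := K.takeWhile (fun k => decide (k < key x)) with hA
    set B := K.dropWhile (fun k => decide (k < key x)) with hB
    have hABK : A ++ B = K := List.takeWhile_append_dropWhile
    have hAlt : ∀ a ∈ A, a < key x := fun a ha => by
      have := List.mem_takeWhile_imp ha; simpa using this
    have hKpAB : (A ++ B).Pairwise (fun a b => a < b) := by rw [hABK]; exact hKp
    have hPA : A.Pairwise (· < ·) := (List.pairwise_append.mp hKpAB).1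
    have hPB : B.Pairwise (· < ·) := (List.pairwise_append.mp hKpAB).2.1
    have hcross : ∀ a ∈ A, ∀ b ∈ B, a < b := (List.pairwise_append.mp hKpAB).2.2
    have hBge : ∀ b ∈ B, key x ≤ b := by
      intro b hb
      cases hB' : B with
      | nil => rw [hB'] at hb; cases hb
      | cons b0 t =>
          have hh := List.head?_dropWhile_not (fun k => decide (k < key x)) K
          rw [← hB, hB'] at hh
          simp only [List.head?_cons] at hh
          have hb0 : key x ≤ b0 := by simpa using hh
          rw [hB'] at hb
          rcases List.mem_cons.mp hb with rfl | hbt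
          · exact hb0
          · have hPB' := hB' ▸ hPB
            have := (List.pairwise_cons.mp hPB').1 b hbt
            exact le_of_lt (lt_of_le_of_lt hb0 this)
    have hFkey : ∀ (k : String) (y : α), y ∈ f k → key y = k := by
      intro k y hy
      rw [hf] at hy
      have := List.of_mem_filter hy
      simpa using this
    have hFnew : ∀ k, k ≠ key x → f' k = f k := by
      intro k hk
      rw [hf', hf]
      simp only [List.filter_append]
      have : List.filter (fun y => key y == k) [x] = [] := by
        simp [Ne.symm hk]
      rw [this, List.append_nil]
    have hFx : f' (key x) = f (key x) ++ [x] := by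
      rw [hf', hf]; simp [List.filter_append]
    -- main goal
    rw [hofl, hsorted_app, ← ih]
    by_cases hin : key x ∈ xs.map key
    · -- key already present
      rw [PySem.Set.add_of_mem ((PySem.Set.mem_ofList _ _).mpr hin), ← hK]
      have hxK : key x ∈ K := (hKmem _).mpr hin
      have hxB : key x ∈ B := by
        rcases (List.mem_append.mp (hABK ▸ hxK : key x ∈ A ++ B)) with hxa | hxb
        · exact absurd (hAlt _ hxa) (lt_irrefl _)
        · exact hxb
      obtain ⟨Bt, hBt⟩ : ∃ Bt, B = key x :: Bt := by
        cases hB' : B with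
        | nil => rw [hB'] at hxB; cases hxB
        | cons b0 t =>
            rw [hB'] at hxB
            rcases List.mem_cons.mp hxB with h0 | ht
            · exact ⟨t, by rw [h0]⟩
            · have hPB' := hB' ▸ hPB
              have hlt := (List.pairwise_cons.mp hPB').1 _ ht
              have hge : key x ≤ b0 := hBge b0 (by rw [hB']; simp)
              exact absurd hlt (not_lt.mpr hge)
      have hKdec : K = A ++ key x :: Bt := by rw [← hABK, hBt]
      have hBtgt : ∀ b ∈ Bt, key x < b := by
        intro b hb
        have hPB' := hBt ▸ hPB
        exact (List.pairwise_cons.mp hPB').1 b hb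
      rw [hKdec]
      -- LHS
      have hL : (A ++ key x :: Bt).flatMap f'
          = A.flatMap f ++ ((f (key x) ++ [x]) ++ Bt.flatMap f) := by
        rw [List.flatMap_append, List.flatMap_cons, hFx]
        congr 1
        · exact List.flatMap_congr (fun a ha => hFnew a (ne_of_lt (hAlt a ha)))
        · congr 1
          exact List.flatMap_congr (fun b hb => hFnew b (ne_of_gt (hBtgt b hb)))
      -- RHS
      have hR : PySem.List.insertBy (fun a b => decide (key a < key b)) x
            ((A ++ key x :: Bt).flatMap f)
          = (A.flatMap f ++ f (key x)) ++ x :: Bt.flatMap f := by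
        have hsplit : (A ++ key x :: Bt).flatMap f
            = (A.flatMap f ++ f (key x)) ++ Bt.flatMap f := by
          rw [List.flatMap_append, List.flatMap_cons, List.append_assoc]
        rw [hsplit]
        apply insertBy_split
        · intro y hy
          rcases List.mem_append.mp hy with hyA | hyx
          · rcases List.mem_flatMap.mp hyA with ⟨a, haA, hya⟩
            have : key y = a := hFkey a y hya
            simp [this, not_lt.mpr (le_of_lt (hAlt a haA))]
          · have : key y = key x := hFkey _ y hyx
            simp [this]
        · intro z hz
          rcases List.mem_flatMap.mp hz with ⟨b, hbB, hzb⟩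
          have : key z = b := hFkey b z hzb
          simp [this, hBtgt b hbB]
      rw [hL, hR]
      simp [List.append_assoc]
    · -- fresh key
      rw [PySem.Set.add_of_not_mem (fun hc => hin ((PySem.Set.mem_ofList _ _).mp hc))]
      have hBgt : ∀ b ∈ B, key x < b := by
        intro b hb
        have hne : b ≠ key x := by
          intro h
          exact hin (h ▸ ((hKmem b).mp (hABK ▸ (List.mem_append.mpr (Or.inr hb)))))
        exact lt_of_le_of_ne (hBge b hb) (Ne.symm hne)
      have hK' : PySem.List.sorted (PySem.Set.ofList (xs.map key) ++ [key x]) (fun k => k) false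
          = A ++ key x :: B := by
        apply PySem.List.sorted_eq_of_perm_of_pairwise_lt
        · refine List.Perm.trans List.perm_middle ?_
          rw [hABK]
          refine List.Perm.trans (List.Perm.cons _ (PySem.List.sorted_perm _ _ _)) ?_
          exact (List.perm_append_singleton _ _).symm
        · rw [List.pairwise_append]
          refine ⟨hPA, ?_, ?_⟩
          · rw [List.pairwise_cons]
            exact ⟨hBgt, hPB⟩
          · intro a ha b hb
            rcases List.mem_cons.mp hb with rfl | hbB
            · exact hAlt a ha
            · exact hcross a ha b hbB
      rw [hK']
      have hfx0 : f (key x) = [] := by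
        rw [hf, List.filter_eq_nil_iff]
        intro y hy hbeq
        exact hin (by
          have : key y = key x := by simpa using hbeq
          exact this ▸ List.mem_map_of_mem hy)
      have hL : (A ++ key x :: B).flatMap f'
          = A.flatMap f ++ ([x] ++ B.flatMap f) := by
        rw [List.flatMap_append, List.flatMap_cons, hFx, hfx0, List.nil_append]
        congr 1
        · exact List.flatMap_congr (fun a ha => hFnew a (ne_of_lt (hAlt a ha)))
        · congr 1
          exact List.flatMap_congr (fun b hb => hFnew b (ne_of_gt (hBgt b hb)))
      have hsplit : K.flatMap f = A.flatMap f ++ B.flatMap f := by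
        rw [← hABK, List.flatMap_append]
      have hR : PySem.List.insertBy (fun a b => decide (key a < key b)) x (K.flatMap f)
          = A.flatMap f ++ x :: B.flatMap f := by
        rw [hsplit]
        apply insertBy_split
        · intro y hy
          rcases List.mem_flatMap.mp hy with ⟨a, haA, hya⟩
          have : key y = a := hFkey a y hya
          simp [this, not_lt.mpr (le_of_lt (hAlt a haA))]
        · intro z hz
          rcases List.mem_flatMap.mp hz with ⟨b, hbB, hzb⟩
          have : key z = b := hFkey b z hzb
          simp [this, hBgt b hbB]
      rw [hL, hR]
      simp

theorem dedup_loop_eq_ofList {α : Type} (key : α → String) (m : List α) :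
    m.foldl (fun a row => if key row ∈ a then a else a ++ [key row]) []
      = PySem.Set.ofList (m.map key) := by
  rw [PySem.Set.ofList_eq_foldl, List.foldl_map]
  apply PySem.List.foldl_congr_mem
  intro acc row _
  by_cases hv : key row ∈ acc
  · rw [PySem.Set.add_of_mem hv]; simp [hv]
  · rw [PySem.Set.add_of_not_mem hv]; simp [hv]

theorem filter_decide_eq (key : List String → String) (n : List (List String)) (k : String) :
    n.filter (fun row => decide (key row = k)) = n.filter (fun row => key row == k) := by
  apply List.filter_congr
  intro row _
  rw [Bool.eq_iff_iff]
  simp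

theorem nameA_eq_sorted (n : List (List String)) :
    nameA n = PySem.List.sorted n (fun r => PySem.List.pyGetD r 0 "") false := by
  show ((PySem.List.sorted
      (n.foldl (fun d row => if PySem.List.pyGetD row 0 "" ∈ d then d
        else d ++ [PySem.List.pyGetD row 0 ""]) []) (fun x => x) false).foldl (fun h f =>
    n.foldl (fun h row => if PySem.List.pyGetD row 0 "" = f then h ++ [row] else h) h) []) = _
  rw [dedup_loop_eq_ofList (fun row => PySem.List.pyGetD row 0 "") n]
  rw [← stable_sort_flatMap (fun r => PySem.List.pyGetD r 0 "") n]
  simp only [PySem.List.foldl_append_ite_eq_filter]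
  rw [PySem.List.foldl_append_eq_flatMap]
  simp only [List.nil_append]
  apply List.flatMap_congr
  intro k _
  exact filter_decide_eq _ n k

theorem keys_groups (m : List (List String)) :
    (m.foldl (fun d row => d.modify (PySem.List.pyGetD row 1 "") [] (fun v => v ++ [row]))
      (PySem.Dict.empty : PySem.Dict String (List (List String)))).keys
    = PySem.Set.ofList (m.map (fun row => PySem.List.pyGetD row 1 "")) := by
  rw [PySem.Dict.keys_foldl_modify_key m (fun row => PySem.List.pyGetD row 1 "") []
        (fun _ row => fun v => v ++ [row])]
  simp [PySem.Set.update, PySem.Set.ofList_eq_foldl, PySem.Dict.keys_empty]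

theorem getD_groups (m : List (List String)) (k : String) :
    (m.foldl (fun d row => d.modify (PySem.List.pyGetD row 1 "") [] (fun v => v ++ [row]))
      (PySem.Dict.empty : PySem.Dict String (List (List String)))).getD k []
    = m.filter (fun row => PySem.List.pyGetD row 1 "" == k) := by
  have hmap : m.foldl (fun d row => d.modify (PySem.List.pyGetD row 1 "") [] (fun v => v ++ [row]))
      (PySem.Dict.empty : PySem.Dict String (List (List String)))
      = (m.map (fun row => (PySem.List.pyGetD row 1 "", row))).foldl
          (fun d p => d.modify p.1 [] (fun v => v ++ [p.2])) PySem.Dict.empty := by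
    rw [List.foldl_map]
  rw [hmap, PySem.Dict.getD_foldl_modify_append]
  rw [List.filter_map, List.map_map]
  simp [Function.comp_def]

theorem major_eq (m : List (List String)) : major m = major_alt m := by
  show ((PySem.List.sorted (m.foldl (fun a row => if PySem.List.pyGetD row 1 "" ∈ a then a
        else a ++ [PySem.List.pyGetD row 1 ""]) []) (fun x => x) false).foldl (fun c x =>
      c ++ [nameA (m.foldl (fun b row => if PySem.List.pyGetD row 1 "" = x then b ++ [row] else b) [])]) []) = _
  rw [dedup_loop_eq_ofList (fun row => PySem.List.pyGetD row 1 "") m]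
  show _ = major_alt m
  unfold major_alt
  simp only [keys_groups, getD_groups]
  rw [PySem.List.foldl_append_singleton_eq_map
        (f := fun x => nameA (m.foldl (fun b row => if PySem.List.pyGetD row 1 "" = x then b ++ [row] else b) []))]
  simp only [List.nil_append]
  apply List.map_congr_left
  intro k _
  rw [PySem.List.foldl_append_ite_eq_filter (fun row => PySem.List.pyGetD row 1 "" = k) m [],
      List.nil_append, filter_decide_eq, nameA_eq_sorted]

-- ===== VERDICT (by name: the statement is the Claim_ definition above) =====
theorem major_spec : Claim_equal_major := by
  intro m _ _
  unfold Spec_major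
  exact major_eq m
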